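-- pv_equiv track=rewrite | github.com/pamfilico/pamfilico-python-utils | pamfilico_python_utils/cli/move_imports_to_top.py | _is_continuation_of_top_level_import
-- ===== SOURCE A (Python) =====
-- from typing import Dict, List, Set, Optional, Any
--
-- def _is_continuation_of_top_level_import(lines: List[str], current_idx: int) -> bool:
--     """
--     Check if the current indented line is a continuation of a top-level multi-line import.
--
--     This prevents treating continuation lines of top-level imports as inline imports.
--     """
--     # Look backwards to find if there's an open multi-line import at top level
--     for i in range(current_idx - 1, -1, -1):
--         line = lines[i]
--         stripped = line.strip()
--
--         # If we hit a non-empty, non-indented line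
--         if stripped and not line.startswith(' ') and not line.startswith('\t'):
--             # Check if it's an import with opening parenthesis
--             if (stripped.startswith('from ') or stripped.startswith('import ')) and '(' in stripped and ')' not in stripped:
--                 # This is a top-level multi-line import that's still open
--                 return True
--             else:
--                 # Found a non-import top-level line, so we're not in a multi-line import
--                 return False
--
--         # If we hit a line with closing parenthesis, the import is closed
--         if ')' in stripped:
--             return False
--
--         # Continue looking backwards
--
--     return False
-- ===== SOURCE B (Python) =====
-- def _is_continuation_of_top_level_import(lines, current_idx):
--     """Filter the preceding lines down to the 'deciding' ones (non-empty
--     top-level lines, or indented lines containing ')'), then judge only the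
--     last decider: an indented decider closes any open import, a top-level
--     decider is tested for being a still-open multi-line import."""
--     def indented(ln):
--         return ln.startswith(' ') or ln.startswith('\t')
--
--     deciders = [ln for ln in lines[:max(0, current_idx)]
--                 if ln.strip() and (not indented(ln) or ')' in ln.strip())]
--     if not deciders:
--         return False
--     last = deciders[-1]
--     if indented(last):
--         return False
--     s = last.strip()
--     return (s.startswith('from ') or s.startswith('import ')) and '(' in s and ')' not in s
-- ===== Notes on version B (the rewrite author's own statement) =====
-- stated objective: alternative
-- what changed: Replaces A's backward early-returning index scan with a declarative two-stage pass: filter lines[0:current_idx] down to the 'deciding' lines and judge only the last one.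
import Mathlib
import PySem

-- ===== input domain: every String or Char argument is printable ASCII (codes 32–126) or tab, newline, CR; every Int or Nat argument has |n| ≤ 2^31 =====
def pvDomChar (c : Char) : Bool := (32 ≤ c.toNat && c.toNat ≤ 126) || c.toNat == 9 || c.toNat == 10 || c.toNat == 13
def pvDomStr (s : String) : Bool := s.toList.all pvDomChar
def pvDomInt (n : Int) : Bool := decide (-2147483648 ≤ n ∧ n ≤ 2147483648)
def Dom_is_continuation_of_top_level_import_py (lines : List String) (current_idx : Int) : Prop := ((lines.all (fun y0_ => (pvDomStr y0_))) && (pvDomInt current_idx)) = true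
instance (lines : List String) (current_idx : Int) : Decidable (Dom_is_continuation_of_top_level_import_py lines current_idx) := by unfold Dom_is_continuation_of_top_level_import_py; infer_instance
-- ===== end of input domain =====

-- B replaces A's backward early-returning index scan by a two-stage filter-then-judge-the-last
-- pass over lines[0:current_idx] (alternative decomposition, same return value; no speed claim).

-- ===== PORT A =====
-- the backward loop 'for i in range(current_idx-1, -1, -1)' with its early returns
def pvA_loop (lines : List String) : List Int → Bool
  | [] => false
  | i :: rest =>
    let line := PySem.List.pyGetD lines i ""   -- in range for every index the loop visits under Pre_
    let stripped := PySem.Str.strip line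
    if stripped != "" && !(PySem.Str.startswith line " ") && !(PySem.Str.startswith line "\t") then
      (PySem.Str.startswith stripped "from " || PySem.Str.startswith stripped "import ")
        && PySem.Str.isIn "(" stripped && !(PySem.Str.isIn ")" stripped)
    else if PySem.Str.isIn ")" stripped then false
    else pvA_loop lines rest

def is_continuation_of_top_level_import_py (lines : List String) (current_idx : Int) : Bool :=
  pvA_loop lines (PySem.List.pyRange (current_idx - 1) (-1) (-1))

-- ===== PORT B =====
-- helper 'indented(ln)' of Source B
def pvIndented (ln : String) : Bool :=
  PySem.Str.startswith ln " " || PySem.Str.startswith ln "\t"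

-- the comprehension's filter predicate: ln.strip() and (not indented(ln) or ')' in ln.strip())
def pvDecider (ln : String) : Bool :=
  PySem.Str.strip ln != "" && (!pvIndented ln || PySem.Str.isIn ")" (PySem.Str.strip ln))

-- 'if not deciders: return False' and the judgement of deciders[-1]
def pvJudgeLast : Option String → Bool
  | none => false
  | some last =>
    if pvIndented last then false
    else
      let s := PySem.Str.strip last
      (PySem.Str.startswith s "from " || PySem.Str.startswith s "import ")
        && PySem.Str.isIn "(" s && !(PySem.Str.isIn ")" s)

def is_continuation_of_top_level_import_py_alt (lines : List String) (current_idx : Int) : Bool :=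
  -- lines[:max(0, current_idx)] with a nonnegative bound is a take
  pvJudgeLast ((lines.take (max 0 current_idx).toNat).filter pvDecider).getLast?

-- ===== PRECONDITION & SPEC =====
-- Pre_ excludes exactly the inputs on which Python A raises IndexError (current_idx > len(lines)).
def Pre_is_continuation_of_top_level_import_py (lines : List String) (current_idx : Int) : Prop :=
  current_idx ≤ (lines.length : Int)
instance (lines : List String) (current_idx : Int) : Decidable (Pre_is_continuation_of_top_level_import_py lines current_idx) := by unfold Pre_is_continuation_of_top_level_import_py; infer_instance

def pvWitness_is_continuation_of_top_level_import_py : List String × Int := (["from x import ("], 1)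

def Spec_is_continuation_of_top_level_import_py (lines : List String) (current_idx : Int) (out : Bool) : Prop := out = is_continuation_of_top_level_import_py_alt lines current_idx
instance (lines : List String) (current_idx : Int) (out : Bool) : Decidable (Spec_is_continuation_of_top_level_import_py lines current_idx out) := by unfold Spec_is_continuation_of_top_level_import_py; infer_instance

-- ===== CLAIM (what is proved, stated in full; the proofs are below) =====
def Claim_equal_is_continuation_of_top_level_import_py : Prop := ∀ (lines : List String) (current_idx : Int), Dom_is_continuation_of_top_level_import_py lines current_idx → Pre_is_continuation_of_top_level_import_py lines current_idx → Spec_is_continuation_of_top_level_import_py lines current_idx (is_continuation_of_top_level_import_py lines current_idx)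

-- ===== LEMMAS AND PROOFS =====

-- A's backward scan over the reversed prefix indices equals B's filter-then-judge-last
theorem pvA_eq_judge (lines : List String) (n : Nat) (h : n ≤ lines.length) :
    pvA_loop lines ((PySem.List.pyRange 0 (n : Int) 1).reverse)
      = pvJudgeLast ((lines.take n).filter pvDecider).getLast? := by
  induction n with
  | zero => simp [PySem.List.pyRange_one_eq_nil, pvA_loop, pvJudgeLast]
  | succ m ih =>
    have hm : m < lines.length := h
    have hr : PySem.List.pyRange 0 ((m : Int) + 1) 1
        = PySem.List.pyRange 0 (m : Int) 1 ++ [(m : Int)] :=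
      PySem.List.pyRange_one_succ_right (by positivity)
    push_cast
    rw [hr, List.reverse_append]
    have hget : PySem.List.pyGetD lines (m : Int) "" = lines[m] := by
      rw [PySem.List.pyGetD_natCast]
      exact List.getD_eq_getElem lines "" hm
    have htake : lines.take (m + 1) = lines.take m ++ [lines[m]] := by
      rw [List.take_add_one]; simp [List.getElem?_eq_getElem hm]
    rw [htake, List.filter_append]
    simp only [List.reverse_singleton, List.singleton_append]
    unfold pvA_loop
    rw [hget]
    simp only []
    by_cases hs : PySem.Str.strip lines[m] = ""
    · -- blank line: skipped by A's loop and dropped by B's filter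
      have hd : pvDecider lines[m] = false := by simp [pvDecider, hs]
      have hfl : List.filter pvDecider [lines[m]] = [] := by simp [hd]
      rw [hfl, List.append_nil, hs]
      have e2 : PySem.Str.isIn ")" "" = false := by decide
      simp only [bne_self_eq_false, Bool.false_and, Bool.false_eq_true, if_false, e2]
      exact ih (Nat.le_of_lt hm)
    · have h1 : (PySem.Str.strip lines[m] != "") = true := by simp [hs]
      by_cases hi : pvIndented lines[m] = true
      · have hsw : (PySem.Str.startswith lines[m] " "
            || PySem.Str.startswith lines[m] "\t") = true := hi
        have hA : (PySem.Str.strip lines[m] != "" && !PySem.Str.startswith lines[m] " "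
            && !PySem.Str.startswith lines[m] "\t") = false := by
          rcases Bool.or_eq_true _ _ |>.mp hsw with h2 | h2 <;>
            simp only [h2, Bool.not_true, Bool.and_false, Bool.false_and]
        by_cases hp : PySem.Str.isIn ")" (PySem.Str.strip lines[m]) = true
        · -- indented line containing ')': both close the import
          have hd : pvDecider lines[m] = true := by
            simp only [pvDecider, h1, hi, hp, Bool.not_true, Bool.false_or, Bool.true_and]
          have hfl : List.filter pvDecider [lines[m]] = [lines[m]] := by simp [hd]
          rw [hfl, List.getLast?_concat]
          simp only [hA, Bool.false_eq_true, if_false, hp, if_true]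
          simp [pvJudgeLast, hi]
        · -- indented line without ')': skipped by A, dropped by B's filter
          have hp' : PySem.Str.isIn ")" (PySem.Str.strip lines[m]) = false := by
            simpa using hp
          have hd : pvDecider lines[m] = false := by
            simp only [pvDecider, h1, hi, hp', Bool.not_true, Bool.false_or, Bool.true_and]
          have hfl : List.filter pvDecider [lines[m]] = [] := by simp [hd]
          rw [hfl, List.append_nil]
          simp only [hA, Bool.false_eq_true, if_false, hp']
          exact ih (Nat.le_of_lt hm)
      · -- top-level non-empty line: both sides run the open-import test on it
        have hi' : pvIndented lines[m] = false := by simpa using hi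
        have hsw : PySem.Str.startswith lines[m] " " = false
            ∧ PySem.Str.startswith lines[m] "\t" = false := by
          have h2 : (PySem.Str.startswith lines[m] " "
              || PySem.Str.startswith lines[m] "\t") = false := hi'
          exact Bool.or_eq_false_iff.mp h2
        have hd : pvDecider lines[m] = true := by
          simp only [pvDecider, h1, hi', Bool.not_false, Bool.true_or, Bool.true_and]
        have hfl : List.filter pvDecider [lines[m]] = [lines[m]] := by simp [hd]
        rw [hfl, List.getLast?_concat]
        simp only [h1, hsw.1, hsw.2, Bool.not_false, Bool.and_true, if_true]
        simp [pvJudgeLast, hi']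

-- ===== VERDICT (by name: the statement is the Claim_ definition above) =====
theorem is_continuation_of_top_level_import_py_spec : Claim_equal_is_continuation_of_top_level_import_py := by
  intro lines c _ hpre
  unfold Spec_is_continuation_of_top_level_import_py
  unfold is_continuation_of_top_level_import_py is_continuation_of_top_level_import_py_alt
  by_cases hc : c ≤ 0
  · have h1 : PySem.List.pyRange (c - 1) (-1) (-1) = [] := by
      rw [PySem.List.pyRange_neg_one]
      simp only [List.map_eq_nil_iff, List.range_eq_nil]
      omega
    have h2 : (max 0 c).toNat = 0 := by omega
    simp [h1, h2, pvA_loop, pvJudgeLast]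
  · have hpre' : c ≤ (lines.length : Int) := hpre
    push Not at hc
    have hn : c = ((c.toNat : Nat) : Int) := by omega
    have hrev : PySem.List.pyRange (c - 1) (-1) (-1)
        = (PySem.List.pyRange 0 c 1).reverse := by
      rw [PySem.List.pyRange_neg_one_eq_reverse]; norm_num
    have h2 : (max 0 c).toNat = c.toNat := by omega
    rw [hrev, h2, hn]
    exact pvA_eq_judge lines c.toNat (by omega)
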